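-- pv_equiv track=rewrite | github.com/Sk1458/codemind-python | Disarium_number.py | dis
-- ===== SOURCE A (Python) =====
-- def dis(n):
--     i=1
--     rev=0
--     R=0
--     while(n>0):
--         res=n%10
--         rev=rev*10+res
--         n=n//10
--     while(rev>0):
--         res=rev%10
--         R+=res**i
--         rev=rev//10
--         i+=1
--     return R
-- ===== SOURCE B (Python) =====
-- def dis(n):
--     def go(m):
--         # returns (sum of digits of m raised to their left-based position, digit count)
--         if m <= 0:
--             return (0, 0)
--         s, k = go(m // 10)
--         return (s + (m % 10) ** (k + 1), k + 1)
--     return go(n)[0]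
-- ===== Notes on version B (the rewrite author's own statement) =====
-- stated objective: simpler
-- what changed: One recursive pass over n's digits tracking the digit count replaces A's two loops (arithmetic reversal of n, then a second digit-extraction loop over the reversed number).
import Mathlib
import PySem

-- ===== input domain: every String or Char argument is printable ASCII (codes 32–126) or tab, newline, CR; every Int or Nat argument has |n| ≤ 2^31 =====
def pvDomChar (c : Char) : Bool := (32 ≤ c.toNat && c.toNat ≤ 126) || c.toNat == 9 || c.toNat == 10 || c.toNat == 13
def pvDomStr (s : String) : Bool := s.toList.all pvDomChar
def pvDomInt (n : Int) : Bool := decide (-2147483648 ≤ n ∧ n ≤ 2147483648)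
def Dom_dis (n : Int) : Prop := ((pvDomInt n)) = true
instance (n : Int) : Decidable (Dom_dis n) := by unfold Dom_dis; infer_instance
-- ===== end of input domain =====

-- B replaces A's two loops (arithmetic digit reversal, then extraction from the
-- reversed number) with a single recursive pass that tracks the digit count: simpler.


-- ===== PORT A =====
-- first while loop: reverse n's digits arithmetically into rev
def disLoop1 (n rev : Int) : Int :=
  if h : n > 0 then
    disLoop1 (PySem.Int.floordiv n 10) (rev * 10 + PySem.Int.mod n 10)
  else rev
termination_by n.toNat
decreasing_by
  rw [PySem.Int.floordiv_eq_ediv_of_pos (by omega : (0:Int) < 10)]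
  omega

-- second while loop: extract digits of rev, raising each to its position i
def disLoop2 (rev R i : Int) : Int :=
  if h : rev > 0 then
    disLoop2 (PySem.Int.floordiv rev 10) (R + (PySem.Int.mod rev 10) ^ i.toNat) (i + 1)
  else R
termination_by rev.toNat
decreasing_by
  rw [PySem.Int.floordiv_eq_ediv_of_pos (by omega : (0:Int) < 10)]
  omega

def dis (n : Int) : Int := disLoop2 (disLoop1 n 0) 0 1

-- ===== PORT B =====
-- go m = (sum of digits of m each raised to its left-based position, digit count)
def disGo (m : Int) : Int × Int :=
  if h : m ≤ 0 then (0, 0)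
  else
    let p := disGo (PySem.Int.floordiv m 10)
    (p.1 + (PySem.Int.mod m 10) ^ (p.2 + 1).toNat, p.2 + 1)
termination_by m.toNat
decreasing_by
  rw [PySem.Int.floordiv_eq_ediv_of_pos (by omega : (0:Int) < 10)]
  omega

def dis_alt (n : Int) : Int := (disGo n).1

-- ===== PRECONDITION & SPEC =====
def Spec_dis (n : Int) (out : Int) : Prop := out = dis_alt n
instance (n : Int) (out : Int) : Decidable (Spec_dis n out) := by unfold Spec_dis; infer_instance

-- ===== CLAIM (what is proved, stated in full; the proofs are below) =====
def Claim_equal_dis : Prop := ∀ (n : Int), Dom_dis n → Spec_dis n (dis n)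

-- ===== LEMMAS AND PROOFS =====

-- digit count of n (0 for n ≤ 0), same recursion shape as the loops
def dLen (n : Int) : Nat :=
  if h : n > 0 then dLen (n / 10) + 1 else 0
termination_by n.toNat
decreasing_by omega

theorem dLen_nonpos {n : Int} (h : ¬ n > 0) : dLen n = 0 := by
  rw [dLen]; simp [h]

theorem dLen_pos {n : Int} (h : n > 0) : dLen n = dLen (n / 10) + 1 := by
  rw [dLen]; simp [h]

-- loop1 characterisation: disLoop1 n rev = rev·10^(dLen n) + (disLoop1 n 0),
-- with 0 ≤ disLoop1 n 0 < 10^(dLen n)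
theorem loop1_char (n : Int) :
    (∀ rev : Int, disLoop1 n rev = rev * 10 ^ (dLen n) + disLoop1 n 0) ∧
    0 ≤ disLoop1 n 0 ∧ disLoop1 n 0 < 10 ^ (dLen n) := by
  induction n using dLen.induct with
  | case1 n hpos ih =>
    have hd10 : PySem.Int.floordiv n 10 = n / 10 :=
      PySem.Int.floordiv_eq_ediv_of_pos (by omega)
    have hm10 : PySem.Int.mod n 10 = n % 10 :=
      PySem.Int.mod_eq_emod_of_pos (by omega)
    obtain ⟨ih1, ih2, ih3⟩ := ih
    have hlen := dLen_pos hpos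
    have h1 : 0 ≤ n % 10 := Int.emod_nonneg n (by omega)
    have h2 : n % 10 < 10 := Int.emod_lt_of_pos n (by omega)
    have hp : (0:Int) < 10 ^ (dLen (n / 10)) := by positivity
    have hstep : ∀ rev : Int, disLoop1 n rev = disLoop1 (n / 10) (rev * 10 + n % 10) := by
      intro rev; rw [disLoop1, dif_pos hpos, hd10, hm10]
    constructor
    · intro rev
      rw [hstep rev, hstep 0, ih1 (rev * 10 + n % 10), ih1 (0 * 10 + n % 10), hlen]
      ring
    · rw [hstep 0, ih1 (0 * 10 + n % 10), hlen]
      constructor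
      · nlinarith
      · have hlt : (0 * 10 + n % 10) * 10 ^ (dLen (n / 10)) + disLoop1 (n / 10) 0
            < 10 * 10 ^ (dLen (n / 10)) := by nlinarith
        calc (0 * 10 + n % 10) * 10 ^ (dLen (n / 10)) + disLoop1 (n / 10) 0
            < 10 * 10 ^ (dLen (n / 10)) := hlt
          _ = 10 ^ (dLen (n / 10) + 1) := by ring
  | case2 n hpos =>
    rw [dLen_nonpos hpos]
    refine ⟨fun rev => ?_, ?_, ?_⟩
    · rw [disLoop1, dif_neg hpos, disLoop1, dif_neg hpos]; ring
    · rw [disLoop1, dif_neg hpos]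
    · rw [disLoop1, dif_neg hpos]; norm_num

-- loop2 splits off the top digit: for 0 ≤ r < 10^k, 0 ≤ d < 10, 1 ≤ i,
-- disLoop2 (d·10^k + r) R i = disLoop2 r R i + d^(i.toNat + k)
theorem loop2_split (k : Nat) : ∀ (d r R i : Int), 0 ≤ r → r < 10 ^ k →
    0 ≤ d → d < 10 → 1 ≤ i →
    disLoop2 (d * 10 ^ k + r) R i = disLoop2 r R i + d ^ (i.toNat + k) := by
  induction k with
  | zero =>
    intro d r R i hr0 hrk hd hd9 hi
    have hr : r = 0 := by omega
    subst hr
    simp only [pow_zero, mul_one, add_zero]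
    by_cases hdp : d > 0
    · have hd10 : PySem.Int.floordiv d 10 = d / 10 :=
        PySem.Int.floordiv_eq_ediv_of_pos (by omega)
      have hm10 : PySem.Int.mod d 10 = d % 10 :=
        PySem.Int.mod_eq_emod_of_pos (by omega)
      have e1 : d / 10 = 0 := by omega
      have e2 : d % 10 = d := by omega
      rw [disLoop2, dif_pos hdp, hd10, hm10, e1, e2,
          disLoop2, dif_neg (by omega : ¬ (0:Int) > 0),
          disLoop2, dif_neg (by omega : ¬ (0:Int) > 0)]
    · have hd0 : d = 0 := by omega
      subst hd0
      rw [zero_pow (by omega : i.toNat ≠ 0)]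
      ring
  | succ k ih =>
    intro d r R i hr0 hrk hd hd9 hi
    by_cases hz : d = 0 ∧ r = 0
    · obtain ⟨h1, h2⟩ := hz; subst h1; subst h2
      simp only [zero_mul, zero_add]
      rw [zero_pow (by omega : i.toNat + (k+1) ≠ 0), add_zero]
    · have hpk : (0:Int) < 10 ^ k := by positivity
      have hpos : d * 10 ^ (k+1) + r > 0 := by
        rcases (by omega : d > 0 ∨ (d = 0 ∧ r > 0)) with h | ⟨h1, h2⟩
        · have hpk1 : (0:Int) < 10 ^ (k+1) := by positivity
          nlinarith
        · simp [h1]; omega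
      have hd10 : PySem.Int.floordiv (d * 10 ^ (k+1) + r) 10 = (d * 10 ^ (k+1) + r) / 10 :=
        PySem.Int.floordiv_eq_ediv_of_pos (by omega)
      have hm10 : PySem.Int.mod (d * 10 ^ (k+1) + r) 10 = (d * 10 ^ (k+1) + r) % 10 :=
        PySem.Int.mod_eq_emod_of_pos (by omega)
      have hrw : d * 10 ^ (k+1) + r = (d * 10 ^ k + r / 10) * 10 + r % 10 := by
        ring_nf
        omega
      obtain ⟨q, hq⟩ : ∃ q, q = d * 10 ^ k + r / 10 := ⟨_, rfl⟩
      have hdiv : (d * 10 ^ (k+1) + r) / 10 = d * 10 ^ k + r / 10 := by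
        rw [hrw, ← hq]; omega
      have hmod : (d * 10 ^ (k+1) + r) % 10 = r % 10 := by
        rw [hrw, ← hq]; omega
      have hrd : r / 10 < 10 ^ k := by
        rw [Int.ediv_lt_iff_lt_mul (by omega : (0:Int) < 10)]
        calc r < 10 ^ (k+1) := hrk
          _ = 10 ^ k * 10 := by ring
      have hstep := ih d (r / 10) (R + (r % 10) ^ i.toNat) (i + 1)
        (by omega) hrd hd hd9 (by omega)
      have hexp : (i + 1).toNat + k = i.toNat + (k + 1) := by omega
      rw [disLoop2, dif_pos hpos, hd10, hm10, hdiv, hmod, hstep, hexp]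
      by_cases hrp : r > 0
      · conv_rhs => rw [disLoop2]
        rw [dif_pos hrp,
            PySem.Int.floordiv_eq_ediv_of_pos (by omega : (0:Int) < 10),
            PySem.Int.mod_eq_emod_of_pos (by omega : (0:Int) < 10)]
      · have hr0' : r = 0 := by omega
        subst hr0'
        norm_num
        rw [zero_pow (by omega : i.toNat ≠ 0)]
        rw [disLoop2, dif_neg (by omega : ¬ (0:Int) > 0),
            disLoop2, dif_neg (by omega : ¬ (0:Int) > 0)]
        ring

-- (disGo m).2 = dLen m
theorem disGo_len (m : Int) : (disGo m).2 = (dLen m : Int) := by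
  induction m using disGo.induct with
  | case1 m h =>
    rw [disGo, dif_pos h, dLen_nonpos (show ¬ m > 0 by omega)]
    simp
  | case2 m h ih =>
    have hd10 : PySem.Int.floordiv m 10 = m / 10 :=
      PySem.Int.floordiv_eq_ediv_of_pos (by omega)
    rw [disGo, dif_neg h, dLen_pos (show m > 0 by omega)]
    rw [hd10] at ih
    simp only [hd10]
    rw [ih]
    push_cast; ring

-- ===== VERDICT (by name: the statement is the Claim_ definition above) =====
theorem dis_spec : Claim_equal_dis := by
  unfold Claim_equal_dis Spec_dis
  intro n hdom
  clear hdom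
  unfold dis dis_alt
  induction n using dLen.induct with
  | case2 n h =>
    rw [disLoop1, dif_neg h, disLoop2, dif_neg (by omega : ¬ (0:Int) > 0),
        disGo, dif_pos (by omega : n ≤ 0)]
  | case1 n h ih =>
    have hd10 : PySem.Int.floordiv n 10 = n / 10 :=
      PySem.Int.floordiv_eq_ediv_of_pos (by omega)
    have hm10 : PySem.Int.mod n 10 = n % 10 :=
      PySem.Int.mod_eq_emod_of_pos (by omega)
    obtain ⟨c1, c2, c3⟩ := loop1_char (n / 10)
    have h1 : 0 ≤ n % 10 := Int.emod_nonneg n (by omega)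
    have h2 : n % 10 < 10 := Int.emod_lt_of_pos n (by omega)
    have hsplit := loop2_split (dLen (n / 10)) (n % 10) (disLoop1 (n / 10) 0) 0 1
      c2 c3 h1 h2 (by omega)
    have hrev : disLoop1 n 0 = (n % 10) * 10 ^ (dLen (n / 10)) + disLoop1 (n / 10) 0 := by
      rw [disLoop1, dif_pos h, hd10, hm10, c1 (0 * 10 + n % 10)]; ring
    have hexp : ((dLen (n / 10) : Int) + 1).toNat = (1:Int).toNat + dLen (n / 10) := by omega
    conv_rhs => rw [disGo]
    rw [dif_neg (show ¬ n ≤ 0 by omega)]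
    simp only [hd10, hm10, disGo_len]
    rw [hexp, hrev, hsplit, ih]
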